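-- pv_equiv track=rewrite | github.com/GeoLiang90/sudokuSolver | sudoku-naive.py | retboxnieghbors
-- ===== SOURCE A (Python) =====
-- Cliques=[
-- #Left to Right
-- [0,1,2,3,4,5,6,7,8],\
-- [9,10,11,12,13,14,15,16,17],\
-- [18,19,20,21,22,23,24,25,26],\
-- [27,28,29,30,31,32,33,34,35],\
-- [36,37,38,39,40,41,42,43,44],\
-- [45,46,47,48,49,50,51,52,53],\
-- [54,55,56,57,58,59,60,61,62],\
-- [63,64,65,66,67,68,69,70,71],\
-- [72,73,74,75,76,77,78,79,80,],\
-- #Top to Bottom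
-- [0,9,18,27,36,45,54,63,72],\
-- [1,10,19,28,37,46,55,64,73],\
-- [2,11,20,29,38,47,56,65,74],\
-- [3,12,21,30,39,48,57,66,75],\
-- [4,13,22,31,40,49,58,67,76],\
-- [5,14,23,32,41,50,59,68,77],\
-- [6,15,24,33,42,51,60,69,78],\
-- [7,16,25,34,43,52,61,70,79],\
-- [8,17,26,35,44,53,62,71,80],\
-- #Boxes in order
-- [0,1,2,9,10,11,18,19,20],\
-- [3,4,5,12,13,14,21,22,23],\
-- [6,7,8,15,16,17,24,25,26],\
-- [27,28,29,36,37,38,45,46,47],\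
-- [30,31,32,39,40,41,48,49,50],\
-- [33,34,35,42,43,44,51,52,53],\
-- [54,55,56,63,64,65,72,73,74],\
-- [57,58,59,66,67,68,75,76,77],\
-- [60,61,62,69,70,71,78,79,80]\
-- ]
--
-- def retboxnieghbors(num):
--     box = []
--     for i in range(18,27):
--         if (num in Cliques[i]):
--             for x in Cliques[i]:
--                 if (x != num):
--                     box.append([int(x/9),x%9])
--     return box
-- ===== SOURCE B (Python) =====
-- def retboxnieghbors(num):
--     # Compute the 3x3 box directly instead of scanning the nine box cliques.
--     if num not in range(81):
--         return []
--     box_row = (num // 9) // 3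
--     box_col = (num % 9) // 3
--     box = []
--     for r in range(3 * box_row, 3 * box_row + 3):
--         for c in range(3 * box_col, 3 * box_col + 3):
--             if 9 * r + c != num:
--                 box.append([r, c])
--     return box
-- ===== Notes on version B (the rewrite author's own statement) =====
-- stated objective: simpler
-- what changed: B derives the cell's box row/column arithmetically and enumerates that box's 9 cells directly, instead of scanning the nine box cliques with membership tests.
import Mathlib
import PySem

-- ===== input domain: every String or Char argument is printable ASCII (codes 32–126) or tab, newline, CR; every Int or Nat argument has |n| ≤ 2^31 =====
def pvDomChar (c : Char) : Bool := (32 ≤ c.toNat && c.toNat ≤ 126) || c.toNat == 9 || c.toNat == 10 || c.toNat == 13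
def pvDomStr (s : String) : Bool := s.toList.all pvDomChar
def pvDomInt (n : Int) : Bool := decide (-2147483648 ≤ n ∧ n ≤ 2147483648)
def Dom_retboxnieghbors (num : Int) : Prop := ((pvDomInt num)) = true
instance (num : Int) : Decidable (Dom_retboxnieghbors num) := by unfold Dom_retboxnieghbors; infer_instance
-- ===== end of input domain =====

-- B computes the cell's 3x3 box arithmetically and enumerates its 9 cells directly, instead of scanning the nine box cliques with membership tests; simpler, same return values.

-- ===== PORT A =====
-- module-level constant Cliques (rows, columns, boxes)
def Cliques : List (List Int) :=
  [[0,1,2,3,4,5,6,7,8],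
   [9,10,11,12,13,14,15,16,17],
   [18,19,20,21,22,23,24,25,26],
   [27,28,29,30,31,32,33,34,35],
   [36,37,38,39,40,41,42,43,44],
   [45,46,47,48,49,50,51,52,53],
   [54,55,56,57,58,59,60,61,62],
   [63,64,65,66,67,68,69,70,71],
   [72,73,74,75,76,77,78,79,80],
   [0,9,18,27,36,45,54,63,72],
   [1,10,19,28,37,46,55,64,73],
   [2,11,20,29,38,47,56,65,74],
   [3,12,21,30,39,48,57,66,75],
   [4,13,22,31,40,49,58,67,76],
   [5,14,23,32,41,50,59,68,77],
   [6,15,24,33,42,51,60,69,78],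
   [7,16,25,34,43,52,61,70,79],
   [8,17,26,35,44,53,62,71,80],
   [0,1,2,9,10,11,18,19,20],
   [3,4,5,12,13,14,21,22,23],
   [6,7,8,15,16,17,24,25,26],
   [27,28,29,36,37,38,45,46,47],
   [30,31,32,39,40,41,48,49,50],
   [33,34,35,42,43,44,51,52,53],
   [54,55,56,63,64,65,72,73,74],
   [57,58,59,66,67,68,75,76,77],
   [60,61,62,69,70,71,78,79,80]]

-- for i in range(18,27): if num in Cliques[i]: for x in Cliques[i]: if x != num: box.append([int(x/9), x%9])
-- range(18,27) is written out as its 9 values (step 1; exact);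
-- int(x/9) truncates toward zero, exact as Int.tdiv for these small ints
def retboxnieghbors (num : Int) : List (List Int) :=
  ([18,19,20,21,22,23,24,25,26] : List Int).foldl (fun box i =>
    let clique := (PySem.List.pyGet? Cliques i).getD []   -- index 18..26 always in range
    if num ∈ clique then
      List.foldl (fun box x =>
        if x ≠ num then box ++ [[Int.tdiv x 9, PySem.Int.mod x 9]] else box) box clique
    else box) []

-- ===== PORT B =====
-- range(a, a+3) with step 1 is exactly the 3 values a, a+1, a+2 (exact)
def range3 (a : Int) : List Int := [a, a + 1, a + 2]

def retboxnieghbors_alt (num : Int) : List (List Int) :=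
  if 0 ≤ num ∧ num < 81 then   -- num in range(81)
    let boxRow := PySem.Int.floordiv (PySem.Int.floordiv num 9) 3
    let boxCol := PySem.Int.floordiv (PySem.Int.mod num 9) 3
    (range3 (3*boxRow)).foldl (fun box r =>
      (range3 (3*boxCol)).foldl (fun box c =>
        if 9*r + c ≠ num then box ++ [[r, c]] else box) box) []
  else []

-- ===== PRECONDITION & SPEC =====
def Spec_retboxnieghbors (num : Int) (out : List (List Int)) : Prop := out = retboxnieghbors_alt num
instance (num : Int) (out : List (List Int)) : Decidable (Spec_retboxnieghbors num out) := by unfold Spec_retboxnieghbors; infer_instance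

-- ===== CLAIM (what is proved, stated in full; the proofs are below) =====
def Claim_equal_retboxnieghbors : Prop := ∀ (num : Int), Dom_retboxnieghbors num → Spec_retboxnieghbors num (retboxnieghbors num)

-- ===== LEMMAS AND PROOFS =====
-- outside 0..80, num belongs to no clique, so A's loop appends nothing
lemma retbox_A_out_of_range (num : Int) (h : num < 0 ∨ 81 ≤ num) :
    retboxnieghbors num = [] := by
  have g : ∀ k ∈ ([18,19,20,21,22,23,24,25,26] : List Int),
      ∀ x ∈ (PySem.List.pyGet? Cliques k).getD [], 0 ≤ x ∧ x < 81 := by decide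
  have m : ∀ k ∈ ([18,19,20,21,22,23,24,25,26] : List Int),
      num ∉ (PySem.List.pyGet? Cliques k).getD [] := by
    intro k hk hm
    have := g k hk num hm
    omega
  simp only [retboxnieghbors, List.foldl]
  rw [if_neg (m 18 (by decide)), if_neg (m 19 (by decide)), if_neg (m 20 (by decide)),
      if_neg (m 21 (by decide)), if_neg (m 22 (by decide)), if_neg (m 23 (by decide)),
      if_neg (m 24 (by decide)), if_neg (m 25 (by decide)), if_neg (m 26 (by decide))]

-- ===== VERDICT (by name: the statement is the Claim_ definition above) =====
theorem retboxnieghbors_spec : Claim_equal_retboxnieghbors := by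
  intro num _
  show retboxnieghbors num = retboxnieghbors_alt num
  by_cases h : 0 ≤ num ∧ num < 81
  · obtain ⟨h0, h81⟩ := h
    interval_cases num <;> decide
  · rw [retbox_A_out_of_range num (by omega), retboxnieghbors_alt, if_neg h]
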